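-- pv_equiv track=rewrite | github.com/EteEteKu/anime_parser | anime_parser/unit_test.py | deg
-- ===== SOURCE A (Python) =====
-- def deg(num):
-- 	a = list(num)
-- 	a.insert(0, '0')
-- 	for i in range(len(a)):
-- 		index = len(a) - i - 1
-- 		z = int(a[index])*2
-- 		a[index] = str(z)
-- 	for i in range(len(a)):
-- 		index = len(a) - i - 1
-- 		if len(a[index])>1:
-- 			a[index-1] = str(int(a[index-1]) + int(a[index][:1]))
-- 			a[index] = a[index][-1:]
--
-- 	return a
-- ===== SOURCE B (Python) =====
-- def deg(num):
-- 	a = list(num)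
-- 	a.insert(0, '0')
-- 	carry = 0
-- 	for i in range(len(a) - 1, -1, -1):
-- 		d = int(a[i]) * 2 + carry
-- 		a[i] = str(d % 10)
-- 		carry = d // 10
-- 	return a
-- ===== Notes on version B (the rewrite author's own statement) =====
-- stated objective: simpler
-- what changed: B replaces A's two passes (double every cell into an intermediate one-or-two-character string, then propagate carries by string slicing) with a single right-to-left pass that keeps an integer carry and writes each final digit once.
import Mathlib
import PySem

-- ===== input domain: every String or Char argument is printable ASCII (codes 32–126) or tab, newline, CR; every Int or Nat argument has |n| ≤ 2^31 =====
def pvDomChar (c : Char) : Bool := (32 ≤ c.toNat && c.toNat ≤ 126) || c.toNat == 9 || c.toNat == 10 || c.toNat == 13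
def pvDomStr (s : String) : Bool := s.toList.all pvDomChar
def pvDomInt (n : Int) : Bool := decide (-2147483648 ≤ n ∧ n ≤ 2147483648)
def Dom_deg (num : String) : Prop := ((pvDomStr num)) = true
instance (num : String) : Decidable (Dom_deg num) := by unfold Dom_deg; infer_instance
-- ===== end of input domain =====

-- B fuses A's double-every-digit pass and its carry-propagation pass into one right-to-left
-- loop with an integer carry (objective: simpler — one loop, no string surgery).

-- ===== PORT A =====
-- int(s) as used under Pre_ (every parsed cell is a digit string, so ofStr? is some)
def pvInt (s : String) : Int := (PySem.Int.ofStr? s).getD 0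

def degStep1 (a : List String) (i : Int) : List String :=
  let index : Int := (a.length : Int) - i - 1
  let z : Int := pvInt (PySem.List.pyGetD a index "") * 2
  PySem.List.pySetD a index (PySem.Int.toStr z)

def degStep2 (a : List String) (i : Int) : List String :=
  let index : Int := (a.length : Int) - i - 1
  let s := PySem.List.pyGetD a index ""
  if 1 < PySem.Str.len s then
    let a' := PySem.List.pySetD a (index - 1)
      (PySem.Int.toStr (pvInt (PySem.List.pyGetD a (index - 1) "") +
                        pvInt (PySem.Str.slice s none (some 1))))
    PySem.List.pySetD a' index (PySem.Str.slice s (some (-1)) none)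
  else a

def deg (num : String) : List String :=
  let a0 := num.toList.map (fun c => String.singleton c)
  let a1 := PySem.List.insert a0 0 "0"
  let a2 := (PySem.List.pyRange 0 (a1.length : Int) 1).foldl degStep1 a1
  let a3 := (PySem.List.pyRange 0 (a2.length : Int) 1).foldl degStep2 a2
  a3

-- ===== PORT B =====
def degAltStep (st : List String × Int) (i : Int) : List String × Int :=
  let d : Int := pvInt (PySem.List.pyGetD st.1 i "") * 2 + st.2
  (PySem.List.pySetD st.1 i (PySem.Int.toStr (PySem.Int.mod d 10)), PySem.Int.floordiv d 10)

def deg_alt (num : String) : List String :=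
  let a0 := num.toList.map (fun c => String.singleton c)
  let a1 := PySem.List.insert a0 0 "0"
  ((PySem.List.pyRange ((a1.length : Int) - 1) (-1) (-1)).foldl degAltStep (a1, 0)).1

-- ===== PRECONDITION & SPEC =====
-- Pre_: every character of num is an ASCII digit — exactly the inputs (inside Dom) on which
-- A's int() calls succeed; on any other character both programs raise ValueError.
def Pre_deg (num : String) : Prop := num.toList.all (fun c => c.isDigit) = true
instance (num : String) : Decidable (Pre_deg num) := by unfold Pre_deg; infer_instance
def pvWitness_deg : String := "19"

def Spec_deg (num : String) (out : List String) : Prop := out = deg_alt num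
instance (num : String) (out : List String) : Decidable (Spec_deg num out) := by unfold Spec_deg; infer_instance

-- ===== CLAIM (what is proved, stated in full; the proofs are below) =====
def Claim_equal_deg : Prop := ∀ (num : String), Dom_deg num → Pre_deg num → Spec_deg num (deg num)

-- ===== LEMMAS AND PROOFS =====

-- value of a cell after the doubling pass
def vOf (s : String) : Int := pvInt s * 2

-- reference carry pass over cell VALUES, right to left, with incoming carry
def cp : List Int → Int → List Int × Int
  | [], c => ([], c)
  | v :: vs, c =>
    let r := cp vs c
    (PySem.Int.mod (v + r.2) 10 :: r.1, PySem.Int.floordiv (v + r.2) 10)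

-- reference for A's second loop: processes the reversed prefix, w = current cell, t = finished tail
def l2r : List Int → Int → List String → List String
  | [], w, t => PySem.Int.toStr w :: t
  | u :: rest, w, t =>
      l2r rest (u + PySem.Int.floordiv w 10) (PySem.Int.toStr (PySem.Int.mod w 10) :: t)

-- reference for B's loop on cell STRINGS
def bgo : List String → Int → List String × Int
  | [], c => ([], c)
  | s :: ss, c =>
    let r := bgo ss c
    let d := pvInt s * 2 + r.2
    (PySem.Int.toStr (PySem.Int.mod d 10) :: r.1, PySem.Int.floordiv d 10)

theorem fd_nonneg {d : Int} (h : 0 ≤ d) : 0 ≤ PySem.Int.floordiv d 10 := by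
  simp only [PySem.Int.floordiv]
  rw [Int.fdiv_eq_ediv]; omega

theorem fd_le_one {d : Int} (h0 : 0 ≤ d) (h : d ≤ 19) : PySem.Int.floordiv d 10 ≤ 1 := by
  simp only [PySem.Int.floordiv]
  rw [Int.fdiv_eq_ediv]; omega

theorem md_small {d : Int} (h0 : 0 ≤ d) (h : d ≤ 9) : PySem.Int.mod d 10 = d := by
  simp only [PySem.Int.mod]
  rw [Int.fmod_eq_emod]; omega

theorem fd_small {d : Int} (h0 : 0 ≤ d) (h : d ≤ 9) : PySem.Int.floordiv d 10 = 0 := by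
  simp only [PySem.Int.floordiv]
  rw [Int.fdiv_eq_ediv]; omega

theorem fd_big {d : Int} (h0 : 10 ≤ d) (h : d ≤ 19) : PySem.Int.floordiv d 10 = 1 := by
  simp only [PySem.Int.floordiv]
  rw [Int.fdiv_eq_ediv]; omega

theorem digit_bounds {c : Char} (h : c.isDigit = true) : '0' ≤ c ∧ c ≤ '9' := by
  simp [Char.isDigit] at h
  exact ⟨h.1, h.2⟩

-- digit characters parse to their value in 0..9
theorem pvInt_digit {c : Char} (h0 : '0' ≤ c) (h9 : c ≤ '9') :
    0 ≤ pvInt (String.singleton c) ∧ pvInt (String.singleton c) ≤ 9 := by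
  have h0' : 48 ≤ c.toNat := h0
  have h9' : c.toNat ≤ 57 := h9
  have hc : c = Char.ofNat c.toNat := by simp [Char.ofNat_toNat]
  rw [hc]
  generalize c.toNat = n at h0' h9'
  interval_cases n <;> decide

-- toStr facts for the small values that occur (0..19)
theorem len_toStr_small {w : Int} (h0 : 0 ≤ w) (h : w ≤ 9) :
    ¬ (1 < PySem.Str.len (PySem.Int.toStr w)) := by
  interval_cases w <;> decide

theorem len_toStr_big {w : Int} (h0 : 10 ≤ w) (h : w ≤ 19) :
    1 < PySem.Str.len (PySem.Int.toStr w) := by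
  interval_cases w <;> decide

theorem pvInt_toStr {u : Int} (h0 : 0 ≤ u) (h : u ≤ 19) :
    pvInt (PySem.Int.toStr u) = u := by
  interval_cases u <;> decide

theorem slice_head_big {w : Int} (h0 : 10 ≤ w) (h : w ≤ 19) :
    pvInt (PySem.Str.slice (PySem.Int.toStr w) none (some 1)) = 1 := by
  interval_cases w <;> decide

theorem slice_last_big {w : Int} (h0 : 10 ≤ w) (h : w ≤ 19) :
    PySem.Str.slice (PySem.Int.toStr w) (some (-1)) none = PySem.Int.toStr (PySem.Int.mod w 10) := by
  interval_cases w <;> decide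

-- ===== loop 1 =====
theorem loop1_gen (b : List String) : ∀ (t : List String),
    (PySem.List.pyRange (t.length : Int) (((b.length + t.length : Nat)) : Int) 1).foldl degStep1 (b ++ t)
    = b.map (fun s => PySem.Int.toStr (vOf s)) ++ t := by
  induction b using List.reverseRecOn with
  | nil =>
    intro t
    rw [PySem.List.pyRange_one_eq_nil (by simp)]
    simp
  | append_singleton b x ih =>
    intro t
    rw [PySem.List.pyRange_one_cons (by simp)]
    have hstep : degStep1 (b ++ [x] ++ t) ((t.length : Int))
        = b ++ (PySem.Int.toStr (vOf x) :: t) := by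
      simp only [degStep1]
      have hidx : ((b ++ [x] ++ t).length : Int) - (t.length : Int) - 1 = ((b.length : Nat) : Int) := by
        simp; omega
      rw [hidx]
      have hget : PySem.List.pyGetD (b ++ [x] ++ t) ((b.length : Int)) "" = x := by
        rw [PySem.List.pyGetD_natCast]
        simp [List.getD, List.append_assoc]
      rw [hget]
      rw [PySem.List.pySetD_natCast, List.append_assoc, List.set_append]
      simp [vOf]
    rw [List.foldl_cons, hstep]
    have harr : (PySem.List.pyRange ((t.length : Int) + 1) (((b ++ [x]).length + t.length : Nat) : Int) 1)
        = PySem.List.pyRange (((PySem.Int.toStr (vOf x) :: t).length : Nat) : Int)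
            (((b.length + (PySem.Int.toStr (vOf x) :: t).length : Nat)) : Int) 1 := by
      congr 1 <;> (push_cast; simp; omega)
    rw [harr, ih (PySem.Int.toStr (vOf x) :: t)]
    simp

-- ===== loop 2 =====
theorem loop2_gen (us : List Int) : ∀ (w : Int) (t : List String),
    (∀ u ∈ us, 0 ≤ u ∧ u ≤ 18) → 0 ≤ w → w ≤ 19 → (us = [] → w ≤ 9) →
    (∀ h, us.head? = some h → h ≤ 8) →
    (PySem.List.pyRange (t.length : Int) (((us.length + 1 + t.length : Nat)) : Int) 1).foldl degStep2
        (us.map PySem.Int.toStr ++ PySem.Int.toStr w :: t)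
    = l2r us.reverse w t := by
  induction us using List.reverseRecOn with
  | nil =>
    intro w t _ hw0 _ hw9 _
    rw [PySem.List.pyRange_one_cons (by simp)]
    rw [PySem.List.pyRange_one_eq_nil (by simp; omega)]
    have hstep : degStep2 (PySem.Int.toStr w :: t) ((t.length : Int)) = PySem.Int.toStr w :: t := by
      simp only [degStep2]
      rw [show ((PySem.Int.toStr w :: t).length : Int) - (t.length : Int) - 1 = 0 by simp]
      rw [PySem.List.pyGetD_zero_cons]
      rw [if_neg (len_toStr_small hw0 (hw9 rfl))]
    simp only [List.foldl_cons, List.foldl_nil]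
    simpa [l2r] using hstep
  | append_singleton us u ih =>
    intro w t hb hw0 hw19 _ hh
    have hu : 0 ≤ u ∧ u ≤ 18 := hb u (by simp)
    have hb' : ∀ v ∈ us, 0 ≤ v ∧ v ≤ 18 := fun v hv => hb v (by simp [hv])
    have hh' : ∀ h, us.head? = some h → h ≤ 8 := by
      intro h hhd
      cases us with
      | nil => simp at hhd
      | cons x xs =>
        have h8 := hh x (by simp)
        simp at hhd
        omega
    have hu8 : us = [] → u ≤ 8 := by
      intro he; subst he; exact hh u (by simp)
    rw [PySem.List.pyRange_one_cons (by simp; omega)]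
    have hstate : (us ++ [u]).map PySem.Int.toStr ++ PySem.Int.toStr w :: t
        = us.map PySem.Int.toStr ++ PySem.Int.toStr u :: PySem.Int.toStr w :: t := by simp
    rw [hstate]
    set n : Int := (((us ++ [u]).length + 1 + t.length : Nat) : Int) with hn
    have hidx : ((us.map PySem.Int.toStr ++ PySem.Int.toStr u :: PySem.Int.toStr w :: t).length : Int)
        - (t.length : Int) - 1 = ((us.length + 1 : Nat) : Int) := by simp; omega
    have hget : PySem.List.pyGetD (us.map PySem.Int.toStr ++ PySem.Int.toStr u :: PySem.Int.toStr w :: t)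
        (((us.length + 1 : Nat) : Int)) "" = PySem.Int.toStr w := by
      rw [PySem.List.pyGetD_natCast]
      simp [List.getD]
    by_cases hcase : 10 ≤ w
    · -- carry case: the cell is two characters long, carry 1 moves left
      have hstep : degStep2 (us.map PySem.Int.toStr ++ PySem.Int.toStr u :: PySem.Int.toStr w :: t)
            ((t.length : Int))
          = us.map PySem.Int.toStr ++ PySem.Int.toStr (u + 1) :: PySem.Int.toStr (PySem.Int.mod w 10) :: t := by
        simp only [degStep2, hidx, hget]
        rw [if_pos (len_toStr_big hcase hw19)]
        rw [show (((us.length + 1 : Nat) : Int)) - 1 = ((us.length : Nat) : Int) by push_cast; omega]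
        have hgetp : PySem.List.pyGetD (us.map PySem.Int.toStr ++ PySem.Int.toStr u :: PySem.Int.toStr w :: t)
            (((us.length : Nat) : Int)) "" = PySem.Int.toStr u := by
          rw [PySem.List.pyGetD_natCast]
          simp [List.getD]
        rw [hgetp, pvInt_toStr hu.1 (by omega), slice_head_big hcase hw19, slice_last_big hcase hw19]
        rw [PySem.List.pySetD_natCast, PySem.List.pySetD_natCast]
        simp
      rw [List.foldl_cons, hstep]
      have harr : PySem.List.pyRange ((t.length : Int) + 1) n 1
          = PySem.List.pyRange (((PySem.Int.toStr (PySem.Int.mod w 10) :: t).length : Nat) : Int)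
              (((us.length + 1 + (PySem.Int.toStr (PySem.Int.mod w 10) :: t).length : Nat)) : Int) 1 := by
        rw [hn]; congr 1 <;> (push_cast; simp; omega)
      rw [harr, ih (u + 1) (PySem.Int.toStr (PySem.Int.mod w 10) :: t) hb' (by omega) (by omega)
            (fun he => by have := hu8 he; omega) hh']
      rw [List.reverse_append]
      simp only [List.reverse_singleton, List.singleton_append, l2r]
      rw [fd_big hcase hw19]
    · -- no-carry case: single character, nothing happens
      have hstep : degStep2 (us.map PySem.Int.toStr ++ PySem.Int.toStr u :: PySem.Int.toStr w :: t)
            ((t.length : Int))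
          = us.map PySem.Int.toStr ++ PySem.Int.toStr u :: PySem.Int.toStr w :: t := by
        simp only [degStep2, hidx, hget]
        rw [if_neg (len_toStr_small hw0 (by omega))]
      rw [List.foldl_cons, hstep]
      have harr : PySem.List.pyRange ((t.length : Int) + 1) n 1
          = PySem.List.pyRange (((PySem.Int.toStr w :: t).length : Nat) : Int)
              (((us.length + 1 + (PySem.Int.toStr w :: t).length : Nat)) : Int) 1 := by
        rw [hn]; congr 1 <;> (push_cast; simp; omega)
      rw [harr, ih u (PySem.Int.toStr w :: t) hb' hu.1 (by omega)
            (fun he => by have := hu8 he; omega) hh']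
      rw [List.reverse_append]
      simp only [List.reverse_singleton, List.singleton_append, l2r]
      rw [fd_small hw0 (by omega), md_small hw0 (by omega), add_zero]

-- ===== B's loop =====
theorem bgo_append (b : List String) (x : String) (c : Int) :
    bgo (b ++ [x]) c
    = ((bgo b (PySem.Int.floordiv (pvInt x * 2 + c) 10)).1
        ++ [PySem.Int.toStr (PySem.Int.mod (pvInt x * 2 + c) 10)],
       (bgo b (PySem.Int.floordiv (pvInt x * 2 + c) 10)).2) := by
  induction b with
  | nil => simp [bgo]
  | cons s ss ih => simp [bgo, ih]

theorem loopB_gen (b : List String) : ∀ (t : List String) (c : Int),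
    (PySem.List.pyRange ((b.length : Int) - 1) (-1) (-1)).foldl degAltStep (b ++ t, c)
    = ((bgo b c).1 ++ t, (bgo b c).2) := by
  induction b using List.reverseRecOn with
  | nil =>
    intro t c
    rw [PySem.List.pyRange_neg_one_eq_nil (by simp)]
    simp [bgo]
  | append_singleton b x ih =>
    intro t c
    have hlen : ((b ++ [x]).length : Int) - 1 = (b.length : Int) := by simp
    rw [hlen, PySem.List.pyRange_neg_one_cons (by omega)]
    have hstep : degAltStep (b ++ [x] ++ t, c) (b.length : Int)
        = (b ++ (PySem.Int.toStr (PySem.Int.mod (pvInt x * 2 + c) 10) :: t),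
           PySem.Int.floordiv (pvInt x * 2 + c) 10) := by
      simp only [degAltStep]
      have hget : PySem.List.pyGetD (b ++ [x] ++ t) ((b.length : Int)) "" = x := by
        rw [PySem.List.pyGetD_natCast]
        simp [List.getD, List.append_assoc]
      rw [hget]
      have hset : PySem.List.pySetD (b ++ [x] ++ t) ((b.length : Int))
          (PySem.Int.toStr (PySem.Int.mod (pvInt x * 2 + c) 10))
          = b ++ (PySem.Int.toStr (PySem.Int.mod (pvInt x * 2 + c) 10) :: t) := by
        rw [PySem.List.pySetD_natCast]
        rw [List.append_assoc]
        rw [List.set_append]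
        simp
      rw [hset]
    rw [List.foldl_cons, hstep]
    rw [show (b.length : Int) - 1 = (b.length : Int) - 1 from rfl]
    rw [ih]
    rw [bgo_append]
    simp

-- bgo over strings is cp over their doubled values
theorem bgo_eq_cp (ss : List String) (c : Int) :
    bgo ss c = (((cp (ss.map vOf) c).1).map PySem.Int.toStr, (cp (ss.map vOf) c).2) := by
  induction ss with
  | nil => simp [bgo, cp]
  | cons s ss ih => simp [bgo, cp, ih, vOf]

-- peel the rightmost value off cp
theorem cp_append (xs : List Int) (w c : Int) :
    cp (xs ++ [w]) c
    = ((cp xs (PySem.Int.floordiv (w + c) 10)).1 ++ [PySem.Int.mod (w + c) 10],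
       (cp xs (PySem.Int.floordiv (w + c) 10)).2) := by
  induction xs with
  | nil => simp [cp]
  | cons x xs ih => simp [cp, ih]

-- the carry of cp over values ≤ 18 with incoming carry ≤ 1 stays in 0..1
theorem cp_bound (vs : List Int) (c : Int) (hv : ∀ v ∈ vs, 0 ≤ v ∧ v ≤ 18)
    (h0 : 0 ≤ c) (h1 : c ≤ 1) : 0 ≤ (cp vs c).2 ∧ (cp vs c).2 ≤ 1 := by
  induction vs with
  | nil => exact ⟨h0, h1⟩
  | cons v vs ih =>
    have hb := ih (fun u hu => hv u (List.mem_cons_of_mem _ hu))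
    have hv0 := hv v (List.mem_cons_self)
    exact ⟨fd_nonneg (by omega), fd_le_one (by omega) (by omega)⟩

-- A's second loop result, read through cp
theorem l2r_eq_cp (rvs : List Int) : ∀ (w : Int) (t : List String),
    l2r (rvs ++ [0]) w t
    = PySem.Int.toStr (0 + (cp (rvs.reverse ++ [w]) 0).2)
      :: ((cp (rvs.reverse ++ [w]) 0).1).map PySem.Int.toStr ++ t := by
  induction rvs with
  | nil => intro w t; simp [l2r, cp]
  | cons u rvs ih =>
    intro w t
    show l2r (rvs ++ [0]) (u + PySem.Int.floordiv w 10) (PySem.Int.toStr (PySem.Int.mod w 10) :: t) = _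
    rw [ih]
    have : (u :: rvs).reverse ++ [w] = (rvs.reverse ++ [u]) ++ [w] := by simp
    rw [this, cp_append (rvs.reverse ++ [u]) w 0, cp_append rvs.reverse u _,
        cp_append rvs.reverse (u + PySem.Int.floordiv w 10) 0]
    simp

-- ===== VERDICT (by name: the statement is the Claim_ definition above) =====
theorem deg_spec : Claim_equal_deg := by
  unfold Claim_equal_deg
  intro num _ hpre
  unfold Spec_deg
  set sl : List String := num.toList.map (fun c => String.singleton c) with hsl
  set vs : List Int := sl.map vOf with hvs
  have hv0 : vOf "0" = 0 := by decide
  have hbound : ∀ v ∈ vs, 0 ≤ v ∧ v ≤ 18 := by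
    intro v hv
    rw [hvs, hsl] at hv
    simp only [List.map_map, List.mem_map] at hv
    obtain ⟨c, hc, rfl⟩ := hv
    have hd := digit_bounds (by have := List.all_eq_true.mp hpre c hc; simpa using this)
    have := pvInt_digit hd.1 hd.2
    simp only [Function.comp, vOf]
    omega
  -- A's first loop doubles every cell
  have h1 : (PySem.List.pyRange 0 ((("0" :: sl).length : Int)) 1).foldl degStep1 ("0" :: sl)
      = ((0 : Int) :: vs).map PySem.Int.toStr := by
    have h := loop1_gen ("0" :: sl) []
    simp only [List.append_nil, List.length_nil, Nat.cast_zero, Nat.add_zero] at h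
    rw [h, hvs]
    simp [hv0, List.map_map, Function.comp_def]
  by_cases hnil : vs = []
  · -- empty input
    have htl : num.toList = [] := by
      have : sl = [] := by
        rw [hvs] at hnil
        exact List.map_eq_nil_iff.mp hnil
      rw [hsl] at this
      exact List.map_eq_nil_iff.mp this
    simp only [deg, deg_alt, htl]
    rfl
  · -- nonempty: split off the rightmost doubled value
    set vs' : List Int := vs.dropLast with hvs'
    set w : Int := vs.getLast hnil with hw
    have hvw : vs' ++ [w] = vs := List.dropLast_append_getLast hnil
    have hwmem : w ∈ vs := List.getLast_mem hnil
    have hw18 := hbound w hwmem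
    have hA : deg num = PySem.Int.toStr (0 + (cp vs 0).2)
        :: ((cp vs 0).1).map PySem.Int.toStr := by
      simp only [deg]
      rw [PySem.List.insert_zero, ← hsl, h1]
      have hsplit : ((0 : Int) :: vs).map PySem.Int.toStr
          = ((0 : Int) :: vs').map PySem.Int.toStr ++ PySem.Int.toStr w :: [] := by
        rw [show (0 : Int) :: vs = ((0 : Int) :: vs') ++ [w] by rw [← hvw]; rfl]
        simp
      rw [hsplit]
      have h2 := loop2_gen ((0 : Int) :: vs') w []
            (by intro u hu
                rcases List.mem_cons.mp hu with h | h
                · omega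
                · exact hbound u (List.dropLast_subset _ h))
            hw18.1 (by omega) (by simp) (by intro h hh; simp at hh; omega)
      simp only [List.length_nil, Nat.cast_zero, Nat.add_zero] at h2
      rw [show (List.map PySem.Int.toStr ((0 : Int) :: vs') ++ PySem.Int.toStr w :: []).length
            = ((0 : Int) :: vs').length + 1 from by simp]
      rw [h2]
      rw [show ((0 : Int) :: vs').reverse = vs'.reverse ++ [0] by simp]
      rw [l2r_eq_cp]
      rw [List.reverse_reverse, hvw]
      simp
    have hB : deg_alt num = PySem.Int.toStr (PySem.Int.mod (0 + (cp vs 0).2) 10)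
        :: ((cp vs 0).1).map PySem.Int.toStr := by
      simp only [deg_alt]
      rw [PySem.List.insert_zero, ← hsl]
      have h3 := loopB_gen ("0" :: sl) [] 0
      rw [List.append_nil] at h3
      rw [h3]
      rw [bgo_eq_cp]
      have : ("0" :: sl).map vOf = (0 : Int) :: vs := by
        simp [hv0, hvs]
      rw [this]
      simp [cp]
    rw [hA, hB]
    have hc := cp_bound vs 0 hbound (by omega) (by omega)
    rw [md_small (by omega) (by omega)]
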